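-- pv_equiv track=rewrite | github.com/vipulphayade/Cybersec-projects | legal-situation-analyzer/api/bylaw_seed.py | get_chapter_title
-- ===== SOURCE A (Python) =====
-- def get_chapter_title(bylaw_number: int) -> str:
--     ranges = [
--         (1, 2, "Preliminary"),
--         (3, 3, "Interpretations"),
--         (4, 4, "Area of Operation"),
--         (5, 5, "Objects"),
--         (6, 6, "Affiliation"),
--         (7, 15, "Funds, Their Utilisation and Investment"),
--         (16, 44, "Members, Their Rights, Responsibilities and Liabilities"),
--         (45, 64, "Responsibilities and Liabilities of Members"),
--         (65, 71, "Levy of Charges of the Society"),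
--         (72, 84, "Incorporation of Duties and Powers of the Society"),
--         (85, 109, "General Meetings"),
--         (110, 140, "Management of the Affairs of the Society"),
--         (141, 147, "Maintenance of Books of Account and Registers"),
--         (148, 148, "Appropriation of Profits"),
--         (149, 150, "Write Off of Irrecoverable Dues"),
--         (151, 153, "Audit of Accounts of the Society"),
--         (154, 161, "Conveyance, Repairs and Maintenance of Property"),
--         (162, 171, "Other Miscellaneous Matters"),
--         (172, 174, "Redressal of Members Complaints"),
--         (175, 175, "Redevelopment"),
--     ]
--     for start, end, title in ranges:
--         if start <= bylaw_number <= end: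
--             return title
--     return "Model Bye-laws"
-- ===== SOURCE B (Python) =====
-- # Chapters are contiguous from 1 to 175, so each chapter is determined by its
-- # upper bound; B binary-searches the sorted (upper_bound, title) list.
-- _CHAPTERS = [
--     (2, "Preliminary"),
--     (3, "Interpretations"),
--     (4, "Area of Operation"),
--     (5, "Objects"),
--     (6, "Affiliation"),
--     (15, "Funds, Their Utilisation and Investment"),
--     (44, "Members, Their Rights, Responsibilities and Liabilities"),
--     (64, "Responsibilities and Liabilities of Members"),
--     (71, "Levy of Charges of the Society"),
--     (84, "Incorporation of Duties and Powers of the Society"),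
--     (109, "General Meetings"),
--     (140, "Management of the Affairs of the Society"),
--     (147, "Maintenance of Books of Account and Registers"),
--     (148, "Appropriation of Profits"),
--     (150, "Write Off of Irrecoverable Dues"),
--     (153, "Audit of Accounts of the Society"),
--     (161, "Conveyance, Repairs and Maintenance of Property"),
--     (171, "Other Miscellaneous Matters"),
--     (174, "Redressal of Members Complaints"),
--     (175, "Redevelopment"),
-- ]
--
-- def _lookup(pairs, n):
--     # binary search by splitting the pair list at its midpoint
--     if len(pairs) <= 1:
--         return pairs[0][1]
--     mid = len(pairs) // 2
--     if n <= pairs[mid - 1][0]: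
--         return _lookup(pairs[:mid], n)
--     return _lookup(pairs[mid:], n)
--
-- def get_chapter_title(bylaw_number: int) -> str:
--     if 1 <= bylaw_number <= 175:
--         return _lookup(_CHAPTERS, bylaw_number)
--     return "Model Bye-laws"
-- ===== Notes on version B (the rewrite author's own statement) =====
-- stated objective: alternative
-- what changed: Replaces A's per-call linear scan over (start,end,title) ranges with a recursive binary search over a sorted list of (upper_bound,title) pairs (the contiguous ranges collapsed to their upper bounds), guarded by a single 1..175 range check.
import Mathlib
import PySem

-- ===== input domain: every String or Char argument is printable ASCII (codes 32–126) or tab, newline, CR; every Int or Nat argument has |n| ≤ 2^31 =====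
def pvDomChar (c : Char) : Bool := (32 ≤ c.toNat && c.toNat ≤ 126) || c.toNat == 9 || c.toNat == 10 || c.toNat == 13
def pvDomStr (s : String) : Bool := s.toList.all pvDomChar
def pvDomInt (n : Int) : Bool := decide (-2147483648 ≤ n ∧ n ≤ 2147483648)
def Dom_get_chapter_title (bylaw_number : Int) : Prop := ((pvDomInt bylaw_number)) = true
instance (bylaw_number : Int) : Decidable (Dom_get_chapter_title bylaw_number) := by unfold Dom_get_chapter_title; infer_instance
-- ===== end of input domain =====

-- B replaces A's per-call linear scan over (start,end,title) ranges with a recursive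
-- binary search over a sorted (upper_bound,title) list, guarded by a 1..175 range check.

-- ===== PORT A =====
def bylawRanges : List (Int × Int × String) := [
  (1, 2, "Preliminary"),
  (3, 3, "Interpretations"),
  (4, 4, "Area of Operation"),
  (5, 5, "Objects"),
  (6, 6, "Affiliation"),
  (7, 15, "Funds, Their Utilisation and Investment"),
  (16, 44, "Members, Their Rights, Responsibilities and Liabilities"),
  (45, 64, "Responsibilities and Liabilities of Members"),
  (65, 71, "Levy of Charges of the Society"),
  (72, 84, "Incorporation of Duties and Powers of the Society"),
  (85, 109, "General Meetings"),
  (110, 140, "Management of the Affairs of the Society"),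
  (141, 147, "Maintenance of Books of Account and Registers"),
  (148, 148, "Appropriation of Profits"),
  (149, 150, "Write Off of Irrecoverable Dues"),
  (151, 153, "Audit of Accounts of the Society"),
  (154, 161, "Conveyance, Repairs and Maintenance of Property"),
  (162, 171, "Other Miscellaneous Matters"),
  (172, 174, "Redressal of Members Complaints"),
  (175, 175, "Redevelopment")]

-- the for-loop with early return, as structural recursion over the ranges list
def chapterLoop (rs : List (Int × Int × String)) (n : Int) : String :=
  match rs with
  | [] => "Model Bye-laws"
  | (s, e, title) :: rest =>
      if s ≤ n ∧ n ≤ e then title else chapterLoop rest n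

def get_chapter_title (bylaw_number : Int) : String :=
  chapterLoop bylawRanges bylaw_number

-- ===== PORT B =====
def bylawChapters : List (Int × String) := [
  (2, "Preliminary"),
  (3, "Interpretations"),
  (4, "Area of Operation"),
  (5, "Objects"),
  (6, "Affiliation"),
  (15, "Funds, Their Utilisation and Investment"),
  (44, "Members, Their Rights, Responsibilities and Liabilities"),
  (64, "Responsibilities and Liabilities of Members"),
  (71, "Levy of Charges of the Society"),
  (84, "Incorporation of Duties and Powers of the Society"),
  (109, "General Meetings"),
  (140, "Management of the Affairs of the Society"),
  (147, "Maintenance of Books of Account and Registers"),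
  (148, "Appropriation of Profits"),
  (150, "Write Off of Irrecoverable Dues"),
  (153, "Audit of Accounts of the Society"),
  (161, "Conveyance, Repairs and Maintenance of Property"),
  (171, "Other Miscellaneous Matters"),
  (174, "Redressal of Members Complaints"),
  (175, "Redevelopment")]

-- _lookup: binary search splitting the pair list at its midpoint; fuel = list length
-- makes the recursion structural (B is only ever called with fuel ≥ length, so the
-- fuel-0 branch is unreachable); pairs[0][1] and pairs[mid-1][0] are exact since the
-- indices are in range whenever the list is nonempty.
def lookupChap : Nat → List (Int × String) → Int → String
  | 0, _, _ => "Model Bye-laws"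
  | fuel + 1, pairs, n =>
      if pairs.length ≤ 1 then
        (pairs.headD (0, "Model Bye-laws")).2
      else
        let mid := pairs.length / 2
        if n ≤ (((pairs.take mid).getLastD (0, "")).1) then
          lookupChap fuel (pairs.take mid) n
        else
          lookupChap fuel (pairs.drop mid) n

def get_chapter_title_alt (bylaw_number : Int) : String :=
  if 1 ≤ bylaw_number ∧ bylaw_number ≤ 175 then
    lookupChap bylawChapters.length bylawChapters bylaw_number
  else "Model Bye-laws"

-- ===== PRECONDITION & SPEC =====
def Spec_get_chapter_title (bylaw_number : Int) (out : String) : Prop := out = get_chapter_title_alt bylaw_number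
instance (bylaw_number : Int) (out : String) : Decidable (Spec_get_chapter_title bylaw_number out) := by unfold Spec_get_chapter_title; infer_instance

-- ===== CLAIM (what is proved, stated in full; the proofs are below) =====
def Claim_equal_get_chapter_title : Prop := ∀ (bylaw_number : Int), Dom_get_chapter_title bylaw_number → Spec_get_chapter_title bylaw_number (get_chapter_title bylaw_number)

-- ===== LEMMAS AND PROOFS =====

set_option maxRecDepth 8000
set_option maxHeartbeats 1600000

theorem chapterLoop_of_all_out (rs : List (Int × Int × String)) (n : Int)
    (h : ∀ r ∈ rs, ¬ (r.1 ≤ n ∧ n ≤ r.2.1)) : chapterLoop rs n = "Model Bye-laws" := by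
  induction rs with
  | nil => rfl
  | cons r rest ih =>
      simp only [chapterLoop]
      rw [if_neg (h r (List.mem_cons_self))]
      exact ih fun q hq => h q (List.mem_cons_of_mem r hq)

theorem equal_out_of_range (n : Int) (h : ¬ (1 ≤ n ∧ n ≤ 175)) :
    get_chapter_title n = get_chapter_title_alt n := by
  have hb : get_chapter_title_alt n = "Model Bye-laws" := by
    unfold get_chapter_title_alt; rw [if_neg h]
  rw [hb]
  have hbnd : ∀ r ∈ bylawRanges, 1 ≤ r.1 ∧ r.2.1 ≤ 175 := by decide
  exact chapterLoop_of_all_out bylawRanges n fun r hr hin =>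
    h ⟨le_trans (hbnd r hr).1 hin.1, le_trans hin.2 (hbnd r hr).2⟩

theorem equal_in_range (n : Int) (h1 : 1 ≤ n) (h2 : n ≤ 175) :
    get_chapter_title n = get_chapter_title_alt n := by
  interval_cases n <;> decide

-- ===== VERDICT (by name: the statement is the Claim_ definition above) =====
theorem get_chapter_title_spec : Claim_equal_get_chapter_title := by
  intro n _
  unfold Spec_get_chapter_title
  by_cases h : 1 ≤ n ∧ n ≤ 175
  · exact equal_in_range n h.1 h.2
  · exact equal_out_of_range n h
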